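-- pv_equiv track=rewrite | github.com/cestella/indextts_mlx | indextts_mlx/emotion_classifier.py | _apply_hysteresis
-- ===== SOURCE A (Python) =====
-- from typing import List, Optional
--
-- def _apply_hysteresis(labels: List[int], min_run: int = 2) -> List[int]:
--     """Smooth a sequence of emotion labels using a run-length hysteresis rule.
--
--     Any run of non-neutral labels shorter than ``min_run`` is collapsed back to
--     neutral (0).  Runs of ``min_run`` or longer are preserved unchanged.
--
--     Args:
--         labels: Raw per-sentence emotion indices.
--         min_run: Minimum run length to keep a non-neutral emotion.
--
--     Returns:
--         Smoothed label list of the same length.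
--     """
--     if not labels:
--         return []
--
--     result = list(labels)
--     n = len(result)
--     i = 0
--     while i < n:
--         if result[i] != 0:
--             # Find the end of this non-neutral run
--             j = i
--             while j < n and result[j] == result[i]:
--                 j += 1
--             run_len = j - i
--             if run_len < min_run:
--                 for k in range(i, j):
--                     result[k] = 0
--             i = j
--         else:
--             i += 1
--
--     return result
-- ===== SOURCE B (Python) =====
-- from typing import List
--
-- def _apply_hysteresis(labels: List[int], min_run: int = 2) -> List[int]:
--     """Per-index formulation: keep labels[i] iff it is neutral or the maximal
--     equal-value run containing i has length >= min_run, where the run length at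
--     i is left[i] + right[i] - 1 computed by two dynamic-programming passes."""
--     n = len(labels)
--     right = [1] * n  # right[i] = length of the equal-value run starting at i
--     for i in range(n - 2, -1, -1):
--         if labels[i] == labels[i + 1]:
--             right[i] = right[i + 1] + 1
--     left = [1] * n  # left[i] = length of the equal-value run ending at i
--     for i in range(1, n):
--         if labels[i] == labels[i - 1]:
--             left[i] = left[i - 1] + 1
--     return [v if v == 0 or left[i] + right[i] - 1 >= min_run else 0
--             for i, v in enumerate(labels)]
-- ===== Notes on version B (the rewrite author's own statement) =====
-- stated objective: alternative
-- what changed: Replaces A's run-finding scan that locates and overwrites whole short runs with a per-index keep/zero decision: two dynamic-programming passes compute left[i]/right[i] run-length arrays and each element is kept iff it is 0 or left[i]+right[i]-1 >= min_run.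
import Mathlib
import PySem

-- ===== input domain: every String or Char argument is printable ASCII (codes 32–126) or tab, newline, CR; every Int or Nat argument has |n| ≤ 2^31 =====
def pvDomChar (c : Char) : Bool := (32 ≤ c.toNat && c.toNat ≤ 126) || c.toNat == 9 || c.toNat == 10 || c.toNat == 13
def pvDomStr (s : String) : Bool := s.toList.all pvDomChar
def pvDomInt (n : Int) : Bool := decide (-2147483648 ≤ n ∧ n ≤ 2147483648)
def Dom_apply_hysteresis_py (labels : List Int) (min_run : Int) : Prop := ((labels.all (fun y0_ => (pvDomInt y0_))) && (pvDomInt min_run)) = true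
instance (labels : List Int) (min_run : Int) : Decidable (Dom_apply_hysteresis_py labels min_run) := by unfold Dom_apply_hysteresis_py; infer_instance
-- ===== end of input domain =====

-- B replaces A's run-finding-and-overwriting scan with a per-index decision driven by two
-- dynamic-programming run-length arrays (left/right); alternative decomposition, return value only.


-- ===== PORT A =====
-- inner 'while j < n and result[j] == result[i]' loop of A
def pyFindRunEnd (result : List Int) (n : Nat) (v : Int) (j : Nat) : Nat :=
  if h : j < n ∧ result.getD j 0 = v then pyFindRunEnd result n v (j + 1) else j
termination_by n - j
decreasing_by omega

-- termination fact cited by pyLoop's decreasing_by: the inner loop never moves left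
theorem pyFindRunEnd_ge (result : List Int) (n : Nat) (v : Int) (j : Nat) :
    j ≤ pyFindRunEnd result n v j := by
  induction j using pyFindRunEnd.induct (result := result) (n := n) (v := v) with
  | case1 j h ih => rw [pyFindRunEnd, dif_pos h]; omega
  | case2 j h => rw [pyFindRunEnd, dif_neg h]

theorem pyFindRunEnd_gt (result : List Int) (n : Nat) (v : Int) (i : Nat)
    (hi : i < n) (hv : result.getD i 0 = v) : i < pyFindRunEnd result n v i := by
  rw [pyFindRunEnd, dif_pos ⟨hi, hv⟩]
  have := pyFindRunEnd_ge result n v (i + 1)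
  omega

-- 'for k in range(i, j): result[k] = 0' of A
def pyZeroRange (result : List Int) (i j : Nat) : List Int :=
  (List.range' i (j - i)).foldl (fun acc k => acc.set k 0) result

-- outer 'while i < n' loop of A
def pyLoop (result : List Int) (n : Nat) (min_run : Int) (i : Nat) : List Int :=
  if hi : i < n then
    if hv : result.getD i 0 ≠ 0 then
      let j := pyFindRunEnd result n (result.getD i 0) i
      if ((j - i : Nat) : Int) < min_run then
        pyLoop (pyZeroRange result i j) n min_run j
      else
        pyLoop result n min_run j
    else
      pyLoop result n min_run (i + 1)
  else result
termination_by n - i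
decreasing_by
  · have := pyFindRunEnd_gt result n (result.getD i 0) i hi rfl; omega
  · have := pyFindRunEnd_gt result n (result.getD i 0) i hi rfl; omega
  · omega

def apply_hysteresis_py (labels : List Int) (min_run : Int) : List Int :=
  if labels = [] then [] else pyLoop labels labels.length min_run 0

-- ===== PORT B =====
-- "right = [1]*n; for i in range(n-2,-1,-1): if labels[i]==labels[i+1]: right[i]=right[i+1]+1"
def pyRunsRight (labels : List Int) : List Int :=
  ((List.range (labels.length - 1)).reverse).foldl
    (fun acc i => if labels.getD i 0 = labels.getD (i + 1) 0 then acc.set i (acc.getD (i + 1) 0 + 1) else acc)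
    (List.replicate labels.length (1 : Int))

-- "left = [1]*n; for i in range(1, n): if labels[i]==labels[i-1]: left[i]=left[i-1]+1"
def pyRunsLeft (labels : List Int) : List Int :=
  (List.range' 1 (labels.length - 1)).foldl
    (fun acc i => if labels.getD i 0 = labels.getD (i - 1) 0 then acc.set i (acc.getD (i - 1) 0 + 1) else acc)
    (List.replicate labels.length (1 : Int))

-- the final list comprehension over enumerate(labels)
def apply_hysteresis_py_alt (labels : List Int) (min_run : Int) : List Int :=
  labels.zipIdx.map (fun p =>
    if p.1 = 0 ∨ min_run ≤ (pyRunsLeft labels).getD p.2 0 + (pyRunsRight labels).getD p.2 0 - 1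
    then p.1 else 0)

-- ===== PRECONDITION & SPEC =====
def Spec_apply_hysteresis_py (labels : List Int) (min_run : Int) (out : List Int) : Prop := out = apply_hysteresis_py_alt labels min_run
instance (labels : List Int) (min_run : Int) (out : List Int) : Decidable (Spec_apply_hysteresis_py labels min_run out) := by unfold Spec_apply_hysteresis_py; infer_instance

-- ===== CLAIM (what is proved, stated in full; the proofs are below) =====
def Claim_equal_apply_hysteresis_py : Prop := ∀ (labels : List Int) (min_run : Int), Dom_apply_hysteresis_py labels min_run → Spec_apply_hysteresis_py labels min_run (apply_hysteresis_py labels min_run)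

-- ===== LEMMAS AND PROOFS =====

-- the maximal prefix of xs equal to v, and the rest
def runSpan (v : Int) : List Int → List Int × List Int
  | [] => ([], [])
  | x :: t =>
    if x = v then
      let p := runSpan v t
      (x :: p.1, p.2)
    else ([], x :: t)

theorem runSpan_snd_length (v : Int) (xs : List Int) : (runSpan v xs).2.length ≤ xs.length := by
  induction xs with
  | nil => simp [runSpan]
  | cons x t ih =>
    simp only [runSpan]
    split
    · simpa using Nat.le_succ_of_le ih
    · simp

-- common reference function: process the list run by run, structurally
def specF (m : Int) : List Int → List Int
  | [] => []
  | x :: t =>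
    if x = 0 then 0 :: specF m t
    else
      let p := runSpan x t
      (if ((p.1.length + 1 : Nat) : Int) < m then List.replicate (p.1.length + 1) 0
       else x :: p.1) ++ specF m p.2
termination_by xs => xs.length
decreasing_by
  · simp
  · have := runSpan_snd_length x t; simpa using Nat.lt_succ_of_le this

theorem runSpan_append (v : Int) (xs : List Int) :
    (runSpan v xs).1 ++ (runSpan v xs).2 = xs := by
  induction xs with
  | nil => simp [runSpan]
  | cons x t ih =>
    simp only [runSpan]
    split
    · simpa using ih
    · simp

theorem runSpan_fst_mem (v : Int) (xs : List Int) : ∀ x ∈ (runSpan v xs).1, x = v := by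
  induction xs with
  | nil => simp [runSpan]
  | cons x t ih =>
    simp only [runSpan]
    split
    · rename_i hx
      intro y hy
      rcases List.mem_cons.mp hy with h | h
      · omega
      · exact ih y h
    · simp

theorem runSpan_snd_head (v : Int) (xs : List Int) : (runSpan v xs).2.head? ≠ some v := by
  induction xs with
  | nil => simp [runSpan]
  | cons x t ih =>
    simp only [runSpan]
    split
    · simpa using ih
    · rename_i hx
      simp only [List.head?_cons, ne_eq, Option.some.injEq]
      exact hx

theorem runSpan_replicate (v : Int) (k : Nat) (rest : List Int)
    (h : rest.head? ≠ some v) :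
    runSpan v (List.replicate k v ++ rest) = (List.replicate k v, rest) := by
  induction k with
  | zero =>
    simp only [List.replicate, List.nil_append]
    cases rest with
    | nil => simp [runSpan]
    | cons y t =>
      have : y ≠ v := by simpa using h
      simp [runSpan, this]
  | succ k ih =>
    simp [List.replicate_succ, runSpan, ih]

theorem specF_zero_prefix (m : Int) (r rest : List Int) (h : ∀ x ∈ r, x = 0) :
    specF m (r ++ rest) = r ++ specF m rest := by
  induction r with
  | nil => simp
  | cons x t ih =>
    have hx : x = 0 := h x (by simp)
    have ht : ∀ y ∈ t, y = 0 := fun y hy => h y (by simp [hy])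
    subst hx
    simp only [List.cons_append, specF]
    simp [ih ht]

-- specF on one maximal run
theorem specF_run (m v : Int) (d : Nat) (rest : List Int) (hd : 0 < d)
    (hne : rest.head? ≠ some v) :
    specF m (List.replicate d v ++ rest)
      = (if v = 0 ∨ m ≤ (d : Int) then List.replicate d v else List.replicate d 0)
        ++ specF m rest := by
  by_cases hv : v = 0
  · subst hv
    rw [specF_zero_prefix m _ rest (by simp), if_pos (Or.inl rfl)]
  · obtain ⟨e, rfl⟩ : ∃ e, d = e + 1 := ⟨d - 1, by omega⟩
    rw [List.replicate_succ, List.cons_append, specF, if_neg hv,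
        runSpan_replicate v e rest hne]
    simp only [List.length_replicate]
    by_cases hm : ((e + 1 : Nat) : Int) < m
    · rw [if_pos hm, if_neg (by push_cast at hm ⊢; omega)]
    · rw [if_neg hm, if_pos (by push_cast at hm ⊢; omega), ← List.replicate_succ]

-- left/right run-length functions used to characterise B's arrays
def llen (xs : List Int) : Nat → Int
  | 0 => 1
  | j + 1 => if xs.getD (j + 1) 0 = xs.getD j 0 then llen xs j + 1 else 1

def rlen (xs : List Int) (j : Nat) : Int :=
  if h : j + 1 < xs.length ∧ xs.getD j 0 = xs.getD (j + 1) 0 then rlen xs (j + 1) + 1 else 1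
termination_by xs.length - j
decreasing_by omega

-- the left loop, after processing indices 1..k
theorem mygetDset (l : List Int) (i j : Nat) (a : Int) :
    (l.set i a).getD j 0 = if i = j ∧ i < l.length then a else l.getD j 0 := by
  rw [List.getD_eq_getElem?_getD, List.getD_eq_getElem?_getD, List.getElem?_set]
  by_cases h : i = j
  · subst h
    by_cases hl : i < l.length
    · simp [hl]
    · simp [hl]
  · simp [h]

theorem pyRunsLeft_inv (xs : List Int) (k : Nat) (hk : k ≤ xs.length - 1) :
    ((List.range' 1 k).foldl
      (fun acc i => if xs.getD i 0 = xs.getD (i - 1) 0 then acc.set i (acc.getD (i - 1) 0 + 1) else acc)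
      (List.replicate xs.length (1 : Int))).length = xs.length ∧
    ∀ j, j < xs.length →
      ((List.range' 1 k).foldl
        (fun acc i => if xs.getD i 0 = xs.getD (i - 1) 0 then acc.set i (acc.getD (i - 1) 0 + 1) else acc)
        (List.replicate xs.length (1 : Int))).getD j 0 = if j ≤ k then llen xs j else 1 := by
  induction k with
  | zero =>
    refine ⟨by simp, ?_⟩
    intro j hj
    simp only [List.range'_zero, List.foldl_nil]
    rw [List.getD_replicate _ hj]
    cases j with
    | zero => simp [llen]
    | succ j => simp
  | succ k ih =>
    have hk' : k ≤ xs.length - 1 := by omega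
    have hn2 : k + 1 < xs.length := by omega
    obtain ⟨hlen, hgd⟩ := ih hk'
    have hconcat : List.range' 1 (k + 1) = List.range' 1 k ++ [k + 1] := by
      have h := List.range'_concat (s := 1) (n := k) (step := 1)
      simpa [Nat.add_comm] using h
    rw [hconcat, List.foldl_append, List.foldl_cons, List.foldl_nil]
    simp only [Nat.add_sub_cancel]
    by_cases hc : xs.getD (k + 1) 0 = xs.getD k 0
    · rw [if_pos hc]
      refine ⟨by rw [List.length_set, hlen], ?_⟩
      intro j hj
      rw [mygetDset, hlen, hgd k (by omega), if_pos (le_refl k)]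
      by_cases hj1 : j = k + 1
      · subst hj1
        rw [if_pos ⟨rfl, hn2⟩, if_pos (le_refl _)]
        have he : llen xs (k + 1) = if xs.getD (k + 1) 0 = xs.getD k 0 then llen xs k + 1 else 1 := rfl
        rw [he, if_pos hc]
      · rw [if_neg (fun h => hj1 h.1.symm), hgd j hj]
        by_cases hjk : j ≤ k
        · rw [if_pos hjk, if_pos (by omega)]
        · rw [if_neg hjk, if_neg (by omega)]
    · rw [if_neg hc]
      refine ⟨hlen, ?_⟩
      intro j hj
      rw [hgd j hj]
      by_cases hj1 : j = k + 1
      · subst hj1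
        rw [if_neg (by omega), if_pos (le_refl _)]
        have he : llen xs (k + 1) = if xs.getD (k + 1) 0 = xs.getD k 0 then llen xs k + 1 else 1 := rfl
        rw [he, if_neg hc]
      · by_cases hjk : j ≤ k
        · rw [if_pos hjk, if_pos (by omega)]
        · rw [if_neg hjk, if_neg (by omega)]

theorem pyRunsLeft_getD (xs : List Int) (j : Nat) (hj : j < xs.length) :
    (pyRunsLeft xs).getD j 0 = llen xs j := by
  unfold pyRunsLeft
  rw [(pyRunsLeft_inv xs (xs.length - 1) le_rfl).2 j hj, if_pos (by omega)]

-- the right loop, after processing indices n-2 .. n-1-k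
theorem pyRunsRight_inv (xs : List Int) (k : Nat) (hk : k ≤ xs.length - 1) :
    (((List.range' (xs.length - 1 - k) k).reverse).foldl
      (fun acc i => if xs.getD i 0 = xs.getD (i + 1) 0 then acc.set i (acc.getD (i + 1) 0 + 1) else acc)
      (List.replicate xs.length (1 : Int))).length = xs.length ∧
    ∀ j, j < xs.length →
      (((List.range' (xs.length - 1 - k) k).reverse).foldl
        (fun acc i => if xs.getD i 0 = xs.getD (i + 1) 0 then acc.set i (acc.getD (i + 1) 0 + 1) else acc)
        (List.replicate xs.length (1 : Int))).getD j 0 = if xs.length - 1 - k ≤ j then rlen xs j else 1 := by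
  induction k with
  | zero =>
    refine ⟨by simp, ?_⟩
    intro j hj
    simp only [List.range'_zero, List.reverse_nil, List.foldl_nil, Nat.sub_zero]
    rw [List.getD_replicate _ hj]
    by_cases h : xs.length - 1 ≤ j
    · rw [if_pos h, rlen, dif_neg (fun hh => by omega)]
    · rw [if_neg h]
  | succ k ih =>
    have hk' : k ≤ xs.length - 1 := by omega
    obtain ⟨hlen, hgd⟩ := ih hk'
    have e2 : xs.length - 1 - (k + 1) + 1 = xs.length - 1 - k := by omega
    have he : List.range' (xs.length - 1 - (k + 1)) (k + 1)
        = (xs.length - 1 - (k + 1)) :: List.range' (xs.length - 1 - k) k := by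
      rw [List.range'_succ, e2]
    rw [he, List.reverse_cons, List.foldl_append, List.foldl_cons, List.foldl_nil]
    have ha1 : xs.length - 1 - (k + 1) + 1 = xs.length - 1 - k := by omega
    have ha1n : xs.length - 1 - (k + 1) + 1 < xs.length := by omega
    have hA1 : ∀ (A : List Int), (∀ j, j < xs.length → A.getD j 0 = if xs.length - 1 - k ≤ j then rlen xs j else 1) →
        A.getD (xs.length - 1 - (k + 1) + 1) 0 = rlen xs (xs.length - 1 - (k + 1) + 1) := by
      intro A hgdA
      rw [hgdA _ ha1n, if_pos (by omega)]
    by_cases hc : xs.getD (xs.length - 1 - (k + 1)) 0 = xs.getD (xs.length - 1 - (k + 1) + 1) 0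
    · rw [if_pos hc]
      refine ⟨by rw [List.length_set, hlen], ?_⟩
      intro j hj
      rw [mygetDset, hlen, hA1 _ hgd]
      by_cases hj1 : j = xs.length - 1 - (k + 1)
      · subst hj1
        rw [if_pos ⟨rfl, by omega⟩, if_pos (le_refl _)]
        have hr : rlen xs (xs.length - 1 - (k + 1))
            = rlen xs (xs.length - 1 - (k + 1) + 1) + 1 := by
          rw [rlen, dif_pos ⟨ha1n, hc⟩]
        rw [hr]
      · rw [if_neg (fun h => hj1 h.1.symm), hgd j hj]
        by_cases hjk : xs.length - 1 - k ≤ j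
        · rw [if_pos hjk, if_pos (by omega)]
        · rw [if_neg hjk, if_neg (by omega)]
    · rw [if_neg hc]
      refine ⟨hlen, ?_⟩
      intro j hj
      rw [hgd j hj]
      by_cases hj1 : j = xs.length - 1 - (k + 1)
      · subst hj1
        rw [if_neg (by omega), if_pos (le_refl _)]
        rw [rlen, dif_neg (fun hh => hc hh.2)]
      · by_cases hjk : xs.length - 1 - k ≤ j
        · rw [if_pos hjk, if_pos (by omega)]
        · rw [if_neg hjk, if_neg (by omega)]

theorem pyRunsRight_getD (xs : List Int) (j : Nat) (hj : j < xs.length) :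
    (pyRunsRight xs).getD j 0 = rlen xs j := by
  unfold pyRunsRight
  have h := (pyRunsRight_inv xs (xs.length - 1) le_rfl).2 j hj
  rw [Nat.sub_self] at h
  rw [List.range_eq_range', h, if_pos (Nat.zero_le j)]

-- B in pointwise form
def altP (xs : List Int) (m : Int) : List Int :=
  xs.zipIdx.map (fun p => if p.1 = 0 ∨ m ≤ llen xs p.2 + rlen xs p.2 - 1 then p.1 else 0)

theorem alt_eq_altP (xs : List Int) (m : Int) :
    apply_hysteresis_py_alt xs m = altP xs m := by
  unfold apply_hysteresis_py_alt altP
  refine List.map_congr_left ?_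
  intro p hp
  have h2 : p.2 < xs.length := by simpa using List.snd_lt_of_mem_zipIdx hp
  rw [pyRunsLeft_getD xs p.2 h2, pyRunsRight_getD xs p.2 h2]

-- run-length values inside and after a maximal run
theorem llen_prefix (v : Int) (d : Nat) (rest : List Int) (i : Nat) (hi : i < d) :
    llen (List.replicate d v ++ rest) i = ((i + 1 : Nat) : Int) := by
  revert hi
  induction i with
  | zero => intro _; simp [llen]
  | succ i ih =>
    intro hi
    have h1 : (List.replicate d v ++ rest).getD (i + 1) 0 = v := by
      rw [List.getD_append _ _ _ _ (by simpa using hi), List.getD_replicate _ hi]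
    have h2 : (List.replicate d v ++ rest).getD i 0 = v := by
      rw [List.getD_append _ _ _ _ (by simp; omega), List.getD_replicate _ (by omega)]
    have he : llen (List.replicate d v ++ rest) (i + 1)
        = if (List.replicate d v ++ rest).getD (i + 1) 0 = (List.replicate d v ++ rest).getD i 0
          then llen (List.replicate d v ++ rest) i + 1 else 1 := rfl
    rw [he, h1, h2, if_pos rfl, ih (by omega)]
    push_cast
    ring

theorem rlen_prefix (v : Int) (d : Nat) (rest : List Int) (hne : rest.head? ≠ some v)
    (i : Nat) (hi : i < d) :
    rlen (List.replicate d v ++ rest) i = ((d - i : Nat) : Int) := by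
  have key : ∀ k i, i < d → d - i = k + 1 →
      rlen (List.replicate d v ++ rest) i = ((d - i : Nat) : Int) := by
    intro k
    induction k with
    | zero =>
      intro i hi hk
      rw [rlen, dif_neg ?_]
      · omega
      · rintro ⟨h1, h2⟩
        cases rest with
        | nil =>
          simp only [List.length_append, List.length_replicate, List.length_nil] at h1
          omega
        | cons r t =>
          have hvr : (List.replicate d v ++ r :: t).getD i 0 = v := by
            rw [List.getD_append _ _ _ _ (by simpa using hi), List.getD_replicate _ hi]
          have hir : (List.replicate d v ++ r :: t).getD (i + 1) 0 = r := by
            rw [List.getD_append_right _ _ _ _ (by simp; omega)]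
            have : i + 1 - (List.replicate d v).length = 0 := by simp; omega
            rw [this]
            rfl
          rw [hvr, hir] at h2
          exact hne (by simp [← h2])
    | succ k ih =>
      intro i hi hk
      have h1 : i + 1 < d := by omega
      have hv1 : (List.replicate d v ++ rest).getD i 0 = v := by
        rw [List.getD_append _ _ _ _ (by simpa using hi), List.getD_replicate _ hi]
      have hv2 : (List.replicate d v ++ rest).getD (i + 1) 0 = v := by
        rw [List.getD_append _ _ _ _ (by simpa using h1), List.getD_replicate _ h1]
      rw [rlen, dif_pos ⟨by simp; omega, by rw [hv1, hv2]⟩]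
      rw [ih (i + 1) (by omega) (by omega)]
      omega
  exact key (d - i - 1) i hi (by omega)

theorem getD_shift (v : Int) (d : Nat) (rest : List Int) (k : Nat) :
    (List.replicate d v ++ rest).getD (d + k) 0 = rest.getD k 0 := by
  rw [List.getD_append_right _ _ _ _ (by simp), List.length_replicate, Nat.add_sub_cancel_left]

theorem llen_shift (v : Int) (d : Nat) (rest : List Int) (hd : 0 < d)
    (hne : rest.head? ≠ some v) (i : Nat) (hi : i < rest.length) :
    llen (List.replicate d v ++ rest) (d + i) = llen rest i := by
  revert hi
  induction i with
  | zero =>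
    intro hi
    obtain ⟨e, rfl⟩ : ∃ e, d = e + 1 := ⟨d - 1, by omega⟩
    show llen (List.replicate (e + 1) v ++ rest) (e + 1) = llen rest 0
    have he : llen (List.replicate (e + 1) v ++ rest) (e + 1)
        = if (List.replicate (e + 1) v ++ rest).getD (e + 1) 0
              = (List.replicate (e + 1) v ++ rest).getD e 0
          then llen (List.replicate (e + 1) v ++ rest) e + 1 else 1 := rfl
    have hv : (List.replicate (e + 1) v ++ rest).getD e 0 = v := by
      rw [List.getD_append _ _ _ _ (by simp), List.getD_replicate _ (by omega)]
    have hr : (List.replicate (e + 1) v ++ rest).getD (e + 1) 0 = rest.getD 0 0 := by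
      have := getD_shift v (e + 1) rest 0
      simpa using this
    cases rest with
    | nil => simp at hi
    | cons r t =>
      have hrv : r ≠ v := by simpa using hne
      rw [he, hv, hr, if_neg (by simpa using hrv)]
      rfl
  | succ i ih =>
    intro hi
    show llen (List.replicate d v ++ rest) ((d + i) + 1) = llen rest (i + 1)
    have he1 : llen (List.replicate d v ++ rest) ((d + i) + 1)
        = if (List.replicate d v ++ rest).getD (d + i + 1) 0
              = (List.replicate d v ++ rest).getD (d + i) 0
          then llen (List.replicate d v ++ rest) (d + i) + 1 else 1 := rfl
    have he2 : llen rest (i + 1)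
        = if rest.getD (i + 1) 0 = rest.getD i 0 then llen rest i + 1 else 1 := rfl
    have hs1 : (List.replicate d v ++ rest).getD (d + i + 1) 0 = rest.getD (i + 1) 0 := by
      have := getD_shift v d rest (i + 1)
      simpa [Nat.add_assoc] using this
    rw [he1, he2, hs1, getD_shift, ih (by omega)]

theorem rlen_shift (v : Int) (d : Nat) (rest : List Int) (i : Nat) (hi : i < rest.length) :
    rlen (List.replicate d v ++ rest) (d + i) = rlen rest i := by
  have key : ∀ k i, i < rest.length → rest.length - i = k + 1 →
      rlen (List.replicate d v ++ rest) (d + i) = rlen rest i := by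
    intro k
    induction k with
    | zero =>
      intro i hi hk
      rw [rlen, dif_neg (by rintro ⟨h1, _⟩; simp at h1; omega)]
      rw [rlen, dif_neg (by rintro ⟨h1, _⟩; omega)]
    | succ k ih =>
      intro i hi hk
      have hi1 : i + 1 < rest.length := by omega
      have hs1 : (List.replicate d v ++ rest).getD (d + i + 1) 0 = rest.getD (i + 1) 0 := by
        have := getD_shift v d rest (i + 1)
        simpa [Nat.add_assoc] using this
      by_cases hc : rest.getD i 0 = rest.getD (i + 1) 0
      · rw [rlen, dif_pos ⟨by simp; omega, by rw [getD_shift, hs1]; exact hc⟩]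
        have hstep : d + i + 1 = d + (i + 1) := by omega
        rw [hstep, ih (i + 1) (by omega) (by omega)]
        have hr2 : rlen rest i = rlen rest (i + 1) + 1 := by
          rw [rlen, dif_pos ⟨by omega, hc⟩]
        rw [hr2]
      · rw [rlen, dif_neg (by rintro ⟨h1, h2⟩; rw [getD_shift, hs1] at h2; exact hc h2)]
        rw [rlen, dif_neg (by rintro ⟨h1, h2⟩; exact hc h2)]
  exact key (rest.length - i - 1) i hi (by omega)

-- altP on one maximal run
theorem altP_run (m v : Int) (d : Nat) (rest : List Int) (hd : 0 < d)
    (hne : rest.head? ≠ some v) :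
    altP (List.replicate d v ++ rest) m
      = (if v = 0 ∨ m ≤ (d : Int) then List.replicate d v else List.replicate d 0)
        ++ altP rest m := by
  unfold altP
  rw [List.zipIdx_append, List.map_append]
  congr 1
  · apply List.ext_getElem
    · simp only [List.length_map, List.length_zipIdx, List.length_replicate]
      split <;> simp
    · intro i h1 h2
      have hi : i < d := by simpa using h1
      rw [List.getElem_map, List.getElem_zipIdx]
      simp only [List.getElem_replicate, Nat.zero_add]
      rw [llen_prefix v d rest i hi, rlen_prefix v d rest hne i hi]
      have harith : ((i + 1 : Nat) : Int) + ((d - i : Nat) : Int) - 1 = (d : Int) := by omega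
      rw [harith]
      by_cases hc : v = 0 ∨ m ≤ (d : Int)
      · simp [hc]
      · simp [hc]
  · simp only [List.length_replicate, Nat.zero_add]
    apply List.ext_getElem
    · simp
    · intro i h1 h2
      have hi : i < rest.length := by simpa using h1
      rw [List.getElem_map, List.getElem_map, List.getElem_zipIdx, List.getElem_zipIdx]
      simp only [Nat.zero_add]
      rw [llen_shift v d rest hd hne i hi, rlen_shift v d rest i hi]

theorem altP_eq_specF (m : Int) (xs : List Int) : altP xs m = specF m xs := by
  have H : ∀ n (xs : List Int), xs.length ≤ n → altP xs m = specF m xs := by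
    intro n
    induction n with
    | zero =>
      intro xs h
      have : xs = [] := List.eq_nil_of_length_eq_zero (by omega)
      subst this
      simp [altP, specF]
    | succ n ih =>
      intro xs h
      match xs with
      | [] => simp [altP, specF]
      | x :: t =>
        have hmem := runSpan_fst_mem x t
        have h1 : x :: (runSpan x t).1 = List.replicate ((runSpan x t).1.length + 1) x := by
          rw [List.replicate_succ]
          congr 1
          exact List.eq_replicate_of_mem hmem
        have hxs : x :: t = List.replicate ((runSpan x t).1.length + 1) x ++ (runSpan x t).2 := by
          conv_lhs => rw [← runSpan_append x t]
          rw [← List.cons_append, h1]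
        have hne := runSpan_snd_head x t
        have hlen : (runSpan x t).2.length ≤ n := by
          have := runSpan_snd_length x t
          simp only [List.length_cons] at h
          omega
        rw [hxs, altP_run m x ((runSpan x t).1.length + 1) (runSpan x t).2 (by omega) hne,
            specF_run m x ((runSpan x t).1.length + 1) (runSpan x t).2 (by omega) hne,
            ih (runSpan x t).2 hlen]
  exact H xs.length xs le_rfl

theorem foldl_set_length (ks : List Nat) (result : List Int) :
    (ks.foldl (fun acc k => acc.set k 0) result).length = result.length := by
  induction ks generalizing result with
  | nil => rfl
  | cons k t ih => simp [List.foldl_cons, ih]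

theorem foldl_set_closed (c : Nat) : ∀ (i : Nat) (result : List Int), i + c ≤ result.length →
    (List.range' i c).foldl (fun acc k => acc.set k 0) result
      = result.take i ++ List.replicate c 0 ++ result.drop (i + c) := by
  induction c with
  | zero => intro i result h; simp
  | succ c ih =>
    intro i result h
    rw [List.range'_succ, List.foldl_cons]
    rw [ih (i + 1) (result.set i 0) (by simp; omega)]
    have hi : i < result.length := by omega
    have hset : (result.take i).set i 0 = result.take i :=
      List.set_eq_of_length_le (by simp)
    have htake : (result.set i 0).take (i + 1) = result.take i ++ [0] := by
      rw [List.take_add_one]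
      simp [hi, List.take_set, hset]
    have hdrop : (result.set i 0).drop (i + 1 + c) = result.drop (i + 1 + c) := by
      rw [List.drop_set, if_pos (by omega : i < i + 1 + c)]
    rw [htake, hdrop]
    simp only [List.replicate_succ]
    simp [List.append_assoc]
    congr 1
    omega

theorem pyFindRunEnd_spec (result : List Int) (n : Nat) (v : Int) (j : Nat) (hj : j ≤ n) :
    pyFindRunEnd result n v j ≤ n ∧
    (∀ k, j ≤ k → k < pyFindRunEnd result n v j → result.getD k 0 = v) ∧
    (pyFindRunEnd result n v j = n ∨ result.getD (pyFindRunEnd result n v j) 0 ≠ v) := by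
  induction j using pyFindRunEnd.induct (result := result) (n := n) (v := v) with
  | case1 j h ih =>
    rw [pyFindRunEnd, dif_pos h]
    have hj1 : j + 1 ≤ n := h.1
    obtain ⟨h1, h2, h3⟩ := ih hj1
    refine ⟨h1, ?_, h3⟩
    intro k hk1 hk2
    rcases Nat.eq_or_lt_of_le hk1 with he | hl
    · rw [← he]; exact h.2
    · exact h2 k hl hk2
  | case2 j h =>
    rw [pyFindRunEnd, dif_neg h]
    rw [not_and_or] at h
    refine ⟨hj, by omega, ?_⟩
    by_cases hn : j < n
    · rcases h with h' | h'
      · omega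
      · exact Or.inr h'
    · omega

theorem drop_run (xs : List Int) (v : Int) : ∀ (d i : Nat), i + d ≤ xs.length →
    (∀ k, i ≤ k → k < i + d → xs.getD k 0 = v) →
    xs.drop i = List.replicate d v ++ xs.drop (i + d) := by
  intro d
  induction d with
  | zero => intro i h _; simp
  | succ d ih =>
    intro i h hall
    have hi : i < xs.length := by omega
    rw [List.drop_eq_getElem_cons hi]
    have hv : xs[i] = v := by
      have := hall i (le_refl i) (by omega)
      rwa [List.getD_eq_getElem xs 0 hi] at this
    have := ih (i + 1) (by omega) (fun k hk1 hk2 => hall k (by omega) (by omega))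
    have he : i + (d + 1) = i + 1 + d := by omega
    rw [List.replicate_succ, hv, List.cons_append, this, he]

theorem take_run (xs : List Int) (v : Int) (d i : Nat) (h : i + d ≤ xs.length)
    (hall : ∀ k, i ≤ k → k < i + d → xs.getD k 0 = v) :
    xs.take (i + d) = xs.take i ++ List.replicate d v := by
  have h1 : xs.take (i + d) = xs.take i ++ (xs.drop i).take d := by
    rw [List.take_add, List.take_drop]
  rw [h1, drop_run xs v d i h hall]
  congr 1
  exact List.take_left' (by simp)

theorem pyLoop_eq (result : List Int) (n : Nat) (m : Int) (i : Nat) :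
    n = result.length → i ≤ n →
    pyLoop result n m i = result.take i ++ specF m (result.drop i) := by
  induction result, i using pyLoop.induct (n := n) (min_run := m) with
  | case1 result i hlt hv j hcond ih =>
    intro hn hi
    rw [pyLoop, dif_pos hlt, dif_pos hv]
    show (if ((j - i : Nat) : Int) < m then pyLoop (pyZeroRange result i j) n m j
          else pyLoop result n m j) = result.take i ++ specF m (result.drop i)
    have hspec := pyFindRunEnd_spec result n (result.getD i 0) i (Nat.le_of_lt hlt)
    have hjn : j ≤ n := hspec.1
    have hall : ∀ k, i ≤ k → k < j → result.getD k 0 = result.getD i 0 := hspec.2.1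
    have hend : j = n ∨ result.getD j 0 ≠ result.getD i 0 := hspec.2.2
    have hij : i < j := pyFindRunEnd_gt result n (result.getD i 0) i hlt rfl
    have hiplus : i + (j - i) = j := by omega
    have hdrop : result.drop i = List.replicate (j - i) (result.getD i 0) ++ result.drop j := by
      have := drop_run result (result.getD i 0) (j - i) i (by omega)
        (fun k hk1 hk2 => hall k hk1 (by omega))
      rwa [hiplus] at this
    have hhead : (result.drop j).head? ≠ some (result.getD i 0) := by
      by_cases hjeq : j = n
      · rw [hjeq, hn, List.drop_length]; simp
      · rcases hend with he | hne
        · exact absurd he hjeq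
        · rw [List.head?_drop, List.getElem?_eq_getElem (by omega : j < result.length)]
          simp only [ne_eq, Option.some.injEq]
          intro hcontra
          exact hne (by rw [List.getD_eq_getElem result 0 (by omega)]; exact hcontra)
    have hd1 : j - i = (j - i - 1) + 1 := by omega
    have hspecF : specF m (result.drop i)
        = (if ((j - i : Nat) : Int) < m then List.replicate (j - i) 0
           else List.replicate (j - i) (result.getD i 0)) ++ specF m (result.drop j) := by
      rw [hdrop, hd1, List.replicate_succ, List.cons_append, specF, if_neg hv]
      rw [runSpan_replicate _ _ _ hhead]
      simp only [List.length_replicate]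
    rw [if_pos hcond]
    have hzrl : (pyZeroRange result i j).length = result.length := by
      unfold pyZeroRange; exact foldl_set_length _ _
    have hzr : pyZeroRange result i j
        = result.take i ++ List.replicate (j - i) 0 ++ result.drop j := by
      have := foldl_set_closed (j - i) i result (by omega)
      rw [hiplus] at this
      unfold pyZeroRange; exact this
    rw [ih (by rw [hzrl]; exact hn) (by omega)]
    have htakeJ : (pyZeroRange result i j).take j
        = result.take i ++ List.replicate (j - i) 0 := by
      rw [hzr]; exact List.take_left' (by simp; omega)
    have hdropJ : (pyZeroRange result i j).drop j = result.drop j := by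
      rw [hzr]; exact List.drop_left' (by simp; omega)
    rw [htakeJ, hdropJ, hspecF, if_pos hcond, List.append_assoc]
  | case2 result i hlt hv j hcond ih =>
    intro hn hi
    rw [pyLoop, dif_pos hlt, dif_pos hv]
    show (if ((j - i : Nat) : Int) < m then pyLoop (pyZeroRange result i j) n m j
          else pyLoop result n m j) = result.take i ++ specF m (result.drop i)
    have hspec := pyFindRunEnd_spec result n (result.getD i 0) i (Nat.le_of_lt hlt)
    have hjn : j ≤ n := hspec.1
    have hall : ∀ k, i ≤ k → k < j → result.getD k 0 = result.getD i 0 := hspec.2.1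
    have hend : j = n ∨ result.getD j 0 ≠ result.getD i 0 := hspec.2.2
    have hij : i < j := pyFindRunEnd_gt result n (result.getD i 0) i hlt rfl
    have hiplus : i + (j - i) = j := by omega
    have hdrop : result.drop i = List.replicate (j - i) (result.getD i 0) ++ result.drop j := by
      have := drop_run result (result.getD i 0) (j - i) i (by omega)
        (fun k hk1 hk2 => hall k hk1 (by omega))
      rwa [hiplus] at this
    have hhead : (result.drop j).head? ≠ some (result.getD i 0) := by
      by_cases hjeq : j = n
      · rw [hjeq, hn, List.drop_length]; simp
      · rcases hend with he | hne
        · exact absurd he hjeq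
        · rw [List.head?_drop, List.getElem?_eq_getElem (by omega : j < result.length)]
          simp only [ne_eq, Option.some.injEq]
          intro hcontra
          exact hne (by rw [List.getD_eq_getElem result 0 (by omega)]; exact hcontra)
    have hd1 : j - i = (j - i - 1) + 1 := by omega
    have hspecF : specF m (result.drop i)
        = (if ((j - i : Nat) : Int) < m then List.replicate (j - i) 0
           else List.replicate (j - i) (result.getD i 0)) ++ specF m (result.drop j) := by
      rw [hdrop, hd1, List.replicate_succ, List.cons_append, specF, if_neg hv]
      rw [runSpan_replicate _ _ _ hhead]
      simp only [List.length_replicate]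
    rw [if_neg hcond]
    rw [ih hn (by omega)]
    have htakeJ : result.take j
        = result.take i ++ List.replicate (j - i) (result.getD i 0) := by
      have := take_run result (result.getD i 0) (j - i) i (by omega)
        (fun k hk1 hk2 => hall k hk1 (by omega))
      rwa [hiplus] at this
    rw [htakeJ, hspecF, if_neg hcond, List.append_assoc]
  | case3 result i hlt hv ih =>
    intro hn hi
    have hv0 : result.getD i 0 = 0 := not_not.mp hv
    have hilen : i < result.length := by omega
    have hget : result[i] = 0 := by
      have := hv0; rwa [List.getD_eq_getElem result 0 hilen] at this
    rw [pyLoop, dif_pos hlt, dif_neg hv]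
    rw [ih hn (by omega)]
    rw [List.drop_eq_getElem_cons hilen, hget, specF]
    rw [List.take_add_one]
    have : result[i]? = some 0 := by rw [List.getElem?_eq_getElem hilen, hget]
    simp [this]
  | case4 result i hlt =>
    intro hn hi
    rw [pyLoop, dif_neg hlt]
    have : i = result.length := by omega
    subst this
    simp [specF]

-- ===== VERDICT (by name: the statement is the Claim_ definition above) =====
theorem apply_hysteresis_py_spec : Claim_equal_apply_hysteresis_py := by
  intro labels min_run _
  unfold Spec_apply_hysteresis_py
  rw [alt_eq_altP, altP_eq_specF]
  unfold apply_hysteresis_py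
  by_cases h : labels = []
  · subst h; simp [specF]
  · rw [if_neg h, pyLoop_eq labels labels.length min_run 0 rfl (by omega)]
    simp
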